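-- pv_equiv track=rewrite | github.com/matangover/pyligeti | scelsi.py | get_square_spiral_positions
-- ===== SOURCE A (Python) =====
-- def get_square_spiral_positions(width):
--     # Start at top-left (0, 0)
--     min_x = min_y = 0
--     max_x = max_y = width
--     while max_x > min_x:
--         # Go right
--         for x in range(min_x, max_x): yield (x, min_y)
--         min_y += 1
--         # Go down
--         for y in range(min_y, max_y): yield (max_x - 1, y)
--         max_x -= 1
--         # Go left
--         for x in range(max_x - 1, min_x - 1, -1): yield (x, max_y - 1)
--         max_y -= 1
--         # Go up
--         for y in range(max_y - 1, min_y - 1, -1): yield (min_x, y)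
--         min_x += 1
-- ===== SOURCE B (Python) =====
-- def get_square_spiral_positions(width):
--     # Single walk: step cell-by-cell, turning per a run-length schedule
--     # width, width-1, width-1, width-2, width-2, ..., 1, 1.
--     if width <= 0:
--         return
--     dirs = ((1, 0), (0, 1), (-1, 0), (0, -1))
--     x, y = 0, 0
--     d = 0
--     lengths = [width] + [k for k in range(width - 1, 0, -1) for _ in (0, 1)]
--     for length in lengths:
--         dx, dy = dirs[d]
--         for i in range(length):
--             yield (x, y)
--             if i < length - 1:
--                 x += dx
--                 y += dy
--         d = (d + 1) % 4
--         dx, dy = dirs[d]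
--         x += dx
--         y += dy
-- ===== Notes on version B (the rewrite author's own statement) =====
-- stated objective: alternative
-- what changed: Replaced the four explicit boundary loops with shrinking min/max bounds by a single cell-by-cell walk driven by a direction cycle and a run-length schedule (width, width-1, width-1, width-2, width-2, ..., 1, 1).
import Mathlib
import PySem

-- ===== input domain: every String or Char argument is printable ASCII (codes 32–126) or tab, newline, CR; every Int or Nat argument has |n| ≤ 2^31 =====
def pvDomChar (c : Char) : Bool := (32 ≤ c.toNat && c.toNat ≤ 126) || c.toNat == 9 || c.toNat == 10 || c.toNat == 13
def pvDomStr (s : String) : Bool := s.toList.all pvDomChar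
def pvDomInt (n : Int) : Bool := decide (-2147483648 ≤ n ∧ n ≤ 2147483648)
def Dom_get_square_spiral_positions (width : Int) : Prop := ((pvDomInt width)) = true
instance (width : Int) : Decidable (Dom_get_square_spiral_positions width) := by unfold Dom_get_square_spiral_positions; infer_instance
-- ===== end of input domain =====

-- B replaces A's four boundary loops by one run-length-scheduled walk; alternative decomposition, same cost.

-- ===== PORT A =====
-- the while-loop of A: state (min_x, min_y, max_x, max_y), one iteration peels one ring
def spiralLoopA (min_x min_y max_x max_y : Int) : List (Int × Int) :=
  if max_x > min_x then
    ((PySem.List.pyRange min_x max_x 1).map (fun x => (x, min_y))) ++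
    ((PySem.List.pyRange (min_y + 1) max_y 1).map (fun y => (max_x - 1, y))) ++
    ((PySem.List.pyRange (max_x - 1 - 1) (min_x - 1) (-1)).map (fun x => (x, max_y - 1))) ++
    ((PySem.List.pyRange (max_y - 1 - 1) (min_y + 1 - 1) (-1)).map (fun y => (min_x, y))) ++
    spiralLoopA (min_x + 1) (min_y + 1) (max_x - 1) (max_y - 1)
  else []
termination_by (max_x - min_x).toNat
decreasing_by omega

def get_square_spiral_positions (width : Int) : List (Int × Int) :=
  spiralLoopA 0 0 width width

-- ===== PORT B =====
def pvDirs : List (Int × Int) := [(1, 0), (0, 1), (-1, 0), (0, -1)]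

-- inner 'for i in range(length)' of Source B: emit, move only when not the last cell of the run;
-- returns (cells, final x, final y)
def pvSegWalk : Nat → Int → Int → Int → Int → List (Int × Int) × Int × Int
  | 0, x, y, _, _ => ([], x, y)
  | 1, x, y, _, _ => ([(x, y)], x, y)
  | n + 2, x, y, dx, dy =>
      let r := pvSegWalk (n + 1) (x + dx) (y + dy) dx dy
      ((x, y) :: r.1, r.2)

-- outer 'for length in lengths' of Source B: walk each run, then turn and step once
def pvWalkSegs : List Int → Int → Int → Nat → List (Int × Int)
  | [], _, _, _ => []
  | len :: rest, x, y, d =>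
      let dxy := pvDirs.getD d (0, 0)
      let r := pvSegWalk len.toNat x y dxy.1 dxy.2
      let d' := (d + 1) % 4
      let dxy' := pvDirs.getD d' (0, 0)
      r.1 ++ pvWalkSegs rest (r.2.1 + dxy'.1) (r.2.2 + dxy'.2) d'

def get_square_spiral_positions_alt (width : Int) : List (Int × Int) :=
  if width ≤ 0 then []
  else
    pvWalkSegs ([width] ++ (PySem.List.pyRange (width - 1) 0 (-1)).flatMap (fun k => [k, k])) 0 0 0

-- ===== PRECONDITION & SPEC =====
def Spec_get_square_spiral_positions (width : Int) (out : List (Int × Int)) : Prop := out = get_square_spiral_positions_alt width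
instance (width : Int) (out : List (Int × Int)) : Decidable (Spec_get_square_spiral_positions width out) := by unfold Spec_get_square_spiral_positions; infer_instance

-- ===== CLAIM (what is proved, stated in full; the proofs are below) =====
def Claim_equal_get_square_spiral_positions : Prop := ∀ (width : Int), Dom_get_square_spiral_positions width → Spec_get_square_spiral_positions width (get_square_spiral_positions width)

-- ===== LEMMAS AND PROOFS =====

-- proof-only helpers
def lengthsI (n : Nat) : List Int :=
  if n = 0 then [] else (n : Int) :: (PySem.List.pyRange ((n : Int) - 1) 0 (-1)).flatMap (fun k => [k, k])

def ringCells (m : Nat) (mx my : Int) : List (Int × Int) :=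
  (List.range (m + 3)).map (fun (i : Nat) => (mx + (i : Int), my)) ++
  (List.range (m + 2)).map (fun (i : Nat) => (mx + (m : Int) + 2, my + 1 + (i : Int))) ++
  (List.range (m + 2)).map (fun (i : Nat) => (mx + (m : Int) + 1 - (i : Int), my + (m : Int) + 2)) ++
  (List.range (m + 1)).map (fun (i : Nat) => (mx, my + (m : Int) + 1 - (i : Int)))

lemma map_pyRange_one_eq (a b : Int) (f : Int → Int × Int) (n : Nat) (h : b - a = (n : Int)) :
    (PySem.List.pyRange a b 1).map f = (List.range n).map (fun (i : Nat) => f (a + (i : Int))) := by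
  rw [PySem.List.pyRange_one, List.map_map, h, Int.toNat_natCast]
  rfl

lemma map_pyRange_neg_one_eq (a b : Int) (f : Int → Int × Int) (n : Nat) (h : a - b = (n : Int)) :
    (PySem.List.pyRange a b (-1)).map f = (List.range n).map (fun (i : Nat) => f (a - (i : Int))) := by
  rw [PySem.List.pyRange_neg_one, List.map_map, h, Int.toNat_natCast]
  rfl

lemma segWalk_eq (n : Nat) : ∀ (x y dx dy : Int),
    pvSegWalk (n + 1) x y dx dy =
      ((List.range (n + 1)).map (fun (i : Nat) => (x + (i : Int) * dx, y + (i : Int) * dy)),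
        x + (n : Int) * dx, y + (n : Int) * dy) := by
  induction n with
  | zero => intro x y dx dy; simp [pvSegWalk]
  | succ m ih =>
      intro x y dx dy
      rw [show m + 1 + 1 = m + 2 from rfl, pvSegWalk, ih]
      dsimp only
      simp only [Prod.mk.injEq]
      refine ⟨?_, by push_cast; ring, by push_cast; ring⟩
      conv_rhs => rw [List.range_succ_eq_map]
      rw [List.map_cons, List.map_map]
      congr 1
      · norm_num
      · apply List.map_congr_left; intro i _
        simp only [Function.comp, Prod.mk.injEq]
        constructor <;> push_cast <;> ring

lemma lengths_expand (m : Nat) :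
    lengthsI (m + 3) =
      ((m : Int) + 3) :: ((m : Int) + 2) :: ((m : Int) + 2) :: ((m : Int) + 1) :: lengthsI (m + 1) := by
  unfold lengthsI
  rw [PySem.List.pyRange_neg_one_cons (by push_cast; omega),
      PySem.List.pyRange_neg_one_cons (by push_cast; omega)]
  simp only [List.flatMap_cons, if_neg (Nat.succ_ne_zero _)]
  push_cast
  ring_nf
  simp [List.cons_append]

lemma A_ring (m : Nat) (mx my : Int) :
    spiralLoopA mx my (mx + ((m : Int) + 3)) (my + ((m : Int) + 3)) =
      ringCells m mx my ++
        spiralLoopA (mx + 1) (my + 1) ((mx + 1) + ((m : Int) + 1)) ((my + 1) + ((m : Int) + 1)) := by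
  rw [spiralLoopA, if_pos (by omega)]
  rw [map_pyRange_one_eq _ _ _ (m + 3) (by push_cast; ring),
      map_pyRange_one_eq _ _ _ (m + 2) (by push_cast; ring),
      map_pyRange_neg_one_eq _ _ _ (m + 2) (by push_cast; ring),
      map_pyRange_neg_one_eq _ _ _ (m + 1) (by push_cast; ring)]
  unfold ringCells
  simp only [List.append_assoc]
  ring_nf

lemma B_ring (m : Nat) (mx my : Int) :
    pvWalkSegs (lengthsI (m + 3)) mx my 0 =
      ringCells m mx my ++ pvWalkSegs (lengthsI (m + 1)) (mx + 1) (my + 1) 0 := by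
  rw [lengths_expand]
  rw [pvWalkSegs, pvWalkSegs, pvWalkSegs, pvWalkSegs]
  simp [pvDirs, List.getD]
  rw [show ((m : Int) + 3).toNat = (m + 2) + 1 by omega,
      show ((m : Int) + 2).toNat = (m + 1) + 1 by omega]
  rw [segWalk_eq, segWalk_eq, segWalk_eq, segWalk_eq]
  dsimp only
  unfold ringCells
  simp only [List.append_assoc]
  push_cast
  ring_nf

lemma ring_eq (n : Nat) : ∀ (mx my : Int),
    spiralLoopA mx my (mx + (n : Int)) (my + (n : Int)) = pvWalkSegs (lengthsI n) mx my 0 := by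
  induction n using Nat.strong_induction_on with
  | _ n ih =>
    match n with
    | 0 =>
      intro mx my
      rw [spiralLoopA, if_neg (by omega)]
      simp [lengthsI, pvWalkSegs]
    | 1 =>
      intro mx my
      rw [spiralLoopA, if_pos (by omega), spiralLoopA, if_neg (by omega)]
      simp [lengthsI, pvWalkSegs, pvSegWalk, pvDirs, PySem.List.pyRange_one]
    | 2 =>
      intro mx my
      rw [spiralLoopA, if_pos (by omega), spiralLoopA, if_neg (by omega)]
      simp [lengthsI, pvWalkSegs, pvSegWalk, pvDirs, PySem.List.pyRange_one,
        PySem.List.pyRange_neg_one]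
      rw [show mx + 2 - 1 - mx = (1 : Int) from by ring,
          show my + 2 - 1 - 1 - my = (0 : Int) from by ring]
      simp [List.range_succ]
      omega
    | (m + 3) =>
      intro mx my
      have h3 : ((m + 3 : Nat) : Int) = (m : Int) + 3 := by push_cast; ring
      rw [h3, A_ring, B_ring]
      congr 1
      have h1 : ((m + 1 : Nat) : Int) = (m : Int) + 1 := by push_cast; ring
      have := ih (m + 1) (by omega) (mx + 1) (my + 1)
      rw [h1] at this
      exact this

-- ===== VERDICT (by name: the statement is the Claim_ definition above) =====
theorem get_square_spiral_positions_spec : Claim_equal_get_square_spiral_positions := by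
  intro width _
  unfold Spec_get_square_spiral_positions get_square_spiral_positions get_square_spiral_positions_alt
  by_cases h : width ≤ 0
  · rw [if_pos h, spiralLoopA, if_neg (by omega)]
  · rw [if_neg h]
    lift width to Nat using (by omega) with n
    have := ring_eq n 0 0
    simp only [zero_add] at this
    rw [this]
    congr 1
    unfold lengthsI
    rw [if_neg (by omega)]
    rfl
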